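-- pv_equiv track=rewrite | github.com/nitingargiitr/LinkedinIn-Matcher-Tech_gc | Recepto-linkedin-matcher_final/utils.py | standardize_country_name
-- ===== SOURCE A (Python) =====
-- from typing import Optional
--
-- def standardize_country_name(location: Optional[str]) -> Optional[str]:
--     if not location:
--         return None
--
--     # Convert to string and clean
--     location = str(location).strip().upper()
--
--     # Country mappings
--     country_map = {
--         "UK": "United Kingdom",
--         "U.K.": "United Kingdom",
--         "GB": "United Kingdom",
--         "GREAT BRITAIN": "United Kingdom",
--         "ENGLAND": "United Kingdom",
--         "SCOTLAND": "United Kingdom",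
--         "WALES": "United Kingdom",
--         "US": "United States",
--         "U.S.": "United States",
--         "USA": "United States",
--         "UNITED STATES OF AMERICA": "United States",
--         "CA": "Canada",
--         "CAN": "Canada",
--         "AU": "Australia",
--         "AUS": "Australia",
--         "DE": "Germany",
--         "GER": "Germany",
--         "FR": "France",
--         "FRA": "France",
--         "IN": "India",
--         "IND": "India",
--         "JP": "Japan",
--         "JPN": "Japan",
--         "SG": "Singapore",
--         "SGP": "Singapore"
--     }
--
--     # Check if location matches any country code
--     standardized = country_map.get(location, None)
--     if standardized:
--         return standardized
--
--     # Check if location is in values (case-insensitive)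
--     for code, name in country_map.items():
--         if location == name.upper():
--             return name
--
--     # If no match, return original location capitalized
--     return location.title()
-- ===== SOURCE B (Python) =====
-- from typing import Optional
--
-- # Alias table as two parallel arrays, keys in sorted order (built once, by hand).
-- # There is NO entry for the canonical names themselves: A's value-scan fallback
-- # (location == name.upper() -> name) is redundant, because every canonical name
-- # is title-case stable, so the final loc.title() already returns it.
-- _KEYS = ["AU", "AUS", "CA", "CAN", "DE", "ENGLAND", "FR", "FRA", "GB", "GER",
--          "GREAT BRITAIN", "IN", "IND", "JP", "JPN", "SCOTLAND", "SG", "SGP",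
--          "U.K.", "U.S.", "UK", "UNITED STATES OF AMERICA", "US", "USA", "WALES"]
-- _NAMES = ["Australia", "Australia", "Canada", "Canada", "Germany",
--           "United Kingdom", "France", "France", "United Kingdom", "Germany",
--           "United Kingdom", "India", "India", "Japan", "Japan",
--           "United Kingdom", "Singapore", "Singapore", "United Kingdom",
--           "United States", "United Kingdom", "United States", "United States",
--           "United States", "United Kingdom"]
--
--
-- def standardize_country_name(location: Optional[str]) -> Optional[str]:
--     if not location:
--         return None
--     loc = str(location).strip().upper()
--     lo, hi = 0, len(_KEYS)
--     while lo < hi: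
--         mid = (lo + hi) // 2
--         k = _KEYS[mid]
--         if k == loc:
--             return _NAMES[mid]
--         if k < loc:
--             lo = mid + 1
--         else:
--             hi = mid
--     return loc.title()
-- ===== Notes on version B (the rewrite author's own statement) =====
-- stated objective: alternative
-- what changed: Replaces A's hash map plus linear value-scan fallback with a sorted key array searched by a hand-written binary search, and eliminates the value scan entirely using the fact that every canonical name is title-case stable, so the final loc.title() fallback already reproduces it.
import Mathlib
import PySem

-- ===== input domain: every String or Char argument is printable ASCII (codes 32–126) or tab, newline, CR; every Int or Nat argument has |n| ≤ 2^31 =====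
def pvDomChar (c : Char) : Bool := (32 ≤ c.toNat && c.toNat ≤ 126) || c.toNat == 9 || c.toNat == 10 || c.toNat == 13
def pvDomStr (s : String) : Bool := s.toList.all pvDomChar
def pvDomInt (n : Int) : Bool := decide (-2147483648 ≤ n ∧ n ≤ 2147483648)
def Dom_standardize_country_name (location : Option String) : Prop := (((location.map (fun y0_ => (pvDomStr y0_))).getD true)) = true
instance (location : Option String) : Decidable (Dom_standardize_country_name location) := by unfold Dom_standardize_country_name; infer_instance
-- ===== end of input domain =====

-- B replaces A's hash map + linear value-scan fallback with a sorted key array searched by a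
-- hand-written binary search; the value scan is dropped because every canonical name is
-- title-case stable, so the final loc.title() fallback already reproduces it.

-- str.title(), hand-ported (no PySem primitive): a letter after a non-letter is uppercased,
-- a letter after a letter is lowercased; exact for the ASCII domain (Python "cased" = alpha there).
-- Shared by both ports (both Pythons call the builtin str.title()).
def pyTitleGo : Bool → List Char → List Char
  | _, [] => []
  | prevCased, c :: cs =>
    if PySem.Chars.isalpha c then
      (if prevCased then PySem.Chars.lowerChar c else PySem.Chars.upperChar c) :: pyTitleGo true cs
    else
      c :: pyTitleGo false cs

def pyTitle (s : String) : String := String.ofList (pyTitleGo false s.toList)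

-- ===== PORT A =====
def countryMapA : PySem.Dict String String := PySem.Dict.mk [
  ("UK", "United Kingdom"), ("U.K.", "United Kingdom"), ("GB", "United Kingdom"),
  ("GREAT BRITAIN", "United Kingdom"), ("ENGLAND", "United Kingdom"),
  ("SCOTLAND", "United Kingdom"), ("WALES", "United Kingdom"),
  ("US", "United States"), ("U.S.", "United States"), ("USA", "United States"),
  ("UNITED STATES OF AMERICA", "United States"),
  ("CA", "Canada"), ("CAN", "Canada"), ("AU", "Australia"), ("AUS", "Australia"),
  ("DE", "Germany"), ("GER", "Germany"), ("FR", "France"), ("FRA", "France"),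
  ("IN", "India"), ("IND", "India"), ("JP", "Japan"), ("JPN", "Japan"),
  ("SG", "Singapore"), ("SGP", "Singapore")]

-- the 'for code, name in country_map.items(): if location == name.upper(): return name' loop,
-- falling through to 'return location.title()'
def scanValuesA (loc : String) : List (String × String) → Option String
  | [] => some (pyTitle loc)
  | (_, name) :: rest =>
    if loc == PySem.Str.upper name then some name else scanValuesA loc rest

-- Python truthiness of an Optional[str]
def pyTruthyOptStr : Option String → Bool
  | none => false
  | some s => !(s == "")

def standardize_country_name (location : Option String) : Option String :=
  match location with
  | none => none
  | some s =>
    if s == "" then none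
    else
      let loc := PySem.Str.upper (PySem.Str.strip s)
      let standardized := countryMapA.get? loc
      if pyTruthyOptStr standardized then standardized
      else scanValuesA loc countryMapA.items

-- ===== PORT B =====
def keysB : List String := ["AU", "AUS", "CA", "CAN", "DE", "ENGLAND", "FR", "FRA", "GB", "GER",
  "GREAT BRITAIN", "IN", "IND", "JP", "JPN", "SCOTLAND", "SG", "SGP",
  "U.K.", "U.S.", "UK", "UNITED STATES OF AMERICA", "US", "USA", "WALES"]
def namesB : List String := ["Australia", "Australia", "Canada", "Canada", "Germany",
  "United Kingdom", "France", "France", "United Kingdom", "Germany",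
  "United Kingdom", "India", "India", "Japan", "Japan",
  "United Kingdom", "Singapore", "Singapore", "United Kingdom",
  "United States", "United Kingdom", "United States", "United States",
  "United States", "United Kingdom"]

-- the while-loop of B, as fuel recursion (fuel ≥ hi-lo makes it total; returning
-- `some name` = the early `return _NAMES[mid]`, `none` = falling out of the loop);
-- _KEYS[mid]/_NAMES[mid] are always in range (0 ≤ lo ≤ mid < hi ≤ 25), so getD is exact
-- Python's 'k < loc' on strings: lexicographic comparison of code points, hand-ported
-- (exact for all strings; Lean's own String '<' instance is not kernel-reducible)
def lexLtChars : List Char → List Char → Bool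
  | [], [] => false
  | [], _ :: _ => true
  | _ :: _, [] => false
  | a :: as, b :: bs =>
    if a.toNat < b.toNat then true
    else if a = b then lexLtChars as bs
    else false

def pyStrLt (a b : String) : Bool := lexLtChars a.toList b.toList

def bsearchB (loc : String) : Nat → Nat → Nat → Option String
  | 0, _, _ => none
  | fuel + 1, lo, hi =>
    if lo < hi then
      let mid := (lo + hi) / 2
      let k := keysB.getD mid ""
      if k == loc then some (namesB.getD mid "")
      else if pyStrLt k loc then bsearchB loc fuel (mid + 1) hi
      else bsearchB loc fuel lo mid
    else none

def standardize_country_name_alt (location : Option String) : Option String :=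
  match location with
  | none => none
  | some s =>
    if s == "" then none
    else
      let loc := PySem.Str.upper (PySem.Str.strip s)
      match bsearchB loc keysB.length 0 keysB.length with
      | some n => some n
      | none => some (pyTitle loc)

-- ===== PRECONDITION & SPEC =====
def Spec_standardize_country_name (location : Option String) (out : Option String) : Prop := out = standardize_country_name_alt location
instance (location : Option String) (out : Option String) : Decidable (Spec_standardize_country_name location out) := by unfold Spec_standardize_country_name; infer_instance

-- ===== CLAIM (what is proved, stated in full; the proofs are below) =====
def Claim_equal_standardize_country_name : Prop := ∀ (location : Option String), Dom_standardize_country_name location → Spec_standardize_country_name location (standardize_country_name location)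

-- ===== LEMMAS AND PROOFS =====

def items25 : List (String × String) := [("UK", "United Kingdom"), ("U.K.", "United Kingdom"), ("GB", "United Kingdom"), ("GREAT BRITAIN", "United Kingdom"), ("ENGLAND", "United Kingdom"), ("SCOTLAND", "United Kingdom"), ("WALES", "United Kingdom"), ("US", "United States"), ("U.S.", "United States"), ("USA", "United States"), ("UNITED STATES OF AMERICA", "United States"), ("CA", "Canada"), ("CAN", "Canada"), ("AU", "Australia"), ("AUS", "Australia"), ("DE", "Germany"), ("GER", "Germany"), ("FR", "France"), ("FRA", "France"), ("IN", "India"), ("IND", "India"), ("JP", "Japan"), ("JPN", "Japan"), ("SG", "Singapore"), ("SGP", "Singapore")]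

theorem countryMapA_mk : countryMapA = PySem.Dict.mk items25 := rfl

theorem mem_of_get?_mk (l : List (String × String)) (x : String) (v : String)
    (h : (PySem.Dict.mk l).get? x = some v) : (x, v) ∈ l := by
  induction l with
  | nil => simp [show (PySem.Dict.mk ([] : List (String × String))).get? x = none from rfl] at h
  | cons p t ih =>
    obtain ⟨k, w⟩ := p
    rw [PySem.Dict.get?_mk_cons] at h
    by_cases hk : k = x
    · simp [hk] at h
      simp [hk, h]
    · simp [hk] at h
      exact List.mem_cons_of_mem _ (ih h)

theorem get?_mk_none_of_not_mem (l : List (String × String)) (x : String)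
    (h : x ∉ l.map Prod.fst) : (PySem.Dict.mk l).get? x = none := by
  cases hg : (PySem.Dict.mk l).get? x with
  | none => rfl
  | some v =>
    exact absurd (List.mem_map.mpr ⟨(x, v), mem_of_get?_mk l x v hg, rfl⟩) h

-- each canonical name is title-case stable: title(upper(name)) = name
theorem values_title_stable : ∀ p ∈ items25, pyTitle (PySem.Str.upper p.2) = p.2 := by decide

-- so A's value scan can only ever produce title(loc)
theorem scan_eq_title (loc : String) (l : List (String × String))
    (hl : ∀ p ∈ l, pyTitle (PySem.Str.upper p.2) = p.2) :
    scanValuesA loc l = some (pyTitle loc) := by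
  induction l with
  | nil => rfl
  | cons p t ih =>
    obtain ⟨c, n⟩ := p
    by_cases h : loc = PySem.Str.upper n
    · have hn := hl (c, n) List.mem_cons_self
      simp [scanValuesA, h, hn]
    · simp only [scanValuesA, beq_iff_eq, h, if_false]
      exact ih (fun q hq => hl q (List.mem_cons_of_mem _ hq))

-- A's keys are exactly keysB (as a set)
theorem items25_fst_sub : ∀ p ∈ items25, p.1 ∈ keysB := by decide

-- if loc is not a key, the binary search falls through
theorem bsearchB_none (loc : String) (hloc : loc ∉ keysB) :
    ∀ fuel lo hi, hi ≤ keysB.length → bsearchB loc fuel lo hi = none := by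
  intro fuel
  induction fuel with
  | zero => intro lo hi _; rfl
  | succ n ih =>
    intro lo hi hhi
    unfold bsearchB
    by_cases hlt : lo < hi
    · have hmid : (lo + hi) / 2 < keysB.length := lt_of_lt_of_le (Nat.div_lt_of_lt_mul (by omega)) hhi
      have hk : keysB.getD ((lo + hi) / 2) "" ∈ keysB := by
        rw [List.getD_eq_getElem keysB "" hmid]
        exact List.getElem_mem hmid
      have hne : ¬ (keysB.getD ((lo + hi) / 2) "" == loc) := by
        simp only [beq_iff_eq]
        intro h; exact hloc (h ▸ hk)
      simp only [hlt, if_true, hne, Bool.false_eq_true, if_false]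
      split
      · exact ih _ _ hhi
      · exact ih _ _ (le_trans (Nat.le_of_lt (Nat.div_lt_of_lt_mul (by omega))) hhi)
    · simp [hlt]

-- the two bodies agree as functions of the normalized location
set_option maxHeartbeats 1600000 in
theorem body_eq (loc : String) :
    (let standardized := countryMapA.get? loc
     if pyTruthyOptStr standardized then standardized
     else scanValuesA loc countryMapA.items)
    = match bsearchB loc keysB.length 0 keysB.length with
      | some n => some n
      | none => some (pyTitle loc) := by
  by_cases hmem : loc ∈ keysB
  · -- loc is one of the 25 literal keys: both sides evaluate
    have h25 : ∀ x ∈ keysB,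
        (let standardized := countryMapA.get? x
         if pyTruthyOptStr standardized then standardized
         else scanValuesA x countryMapA.items)
        = match bsearchB x keysB.length 0 keysB.length with
          | some n => some n
          | none => some (pyTitle x) := by decide
    exact h25 loc hmem
  · -- loc is not a key: dict lookup misses, scan yields title(loc), search falls through
    have hget : countryMapA.get? loc = none := by
      rw [countryMapA_mk]
      exact get?_mk_none_of_not_mem items25 loc
        (fun h => hmem (by
          obtain ⟨p, hp, hpe⟩ := List.mem_map.mp h
          exact hpe ▸ items25_fst_sub p hp))
    have hitems : countryMapA.items = items25 := rfl
    simp only [hget, pyTruthyOptStr, Bool.false_eq_true, if_false, hitems,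
      scan_eq_title loc items25 values_title_stable,
      bsearchB_none loc hmem keysB.length 0 keysB.length (le_refl _)]

-- ===== VERDICT (by name: the statement is the Claim_ definition above) =====
set_option maxHeartbeats 1600000 in
theorem standardize_country_name_spec : Claim_equal_standardize_country_name := by
  intro location _
  unfold Spec_standardize_country_name
  cases location with
  | none => rfl
  | some s =>
    by_cases hb : s = ""
    · subst hb; rfl
    · have hb' : (s == "") = false := by simp [hb]
      show (if (s == "") = true then none
            else
              let loc := PySem.Str.upper (PySem.Str.strip s)
              let standardized := countryMapA.get? loc
              if pyTruthyOptStr standardized = true then standardized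
              else scanValuesA loc countryMapA.items)
          = (if (s == "") = true then none
            else
              let loc := PySem.Str.upper (PySem.Str.strip s)
              match bsearchB loc keysB.length 0 keysB.length with
              | some n => some n
              | none => some (pyTitle loc))
      rw [hb']
      generalize PySem.Str.upper (PySem.Str.strip s) = loc
      exact body_eq loc
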